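-- pv_equiv track=rewrite | github.com/proTuna/algorithm-study | 시뮬레이션구현/14890.py | go
-- ===== SOURCE A (Python) =====
-- def go(a,l):
--     n = len(a)
--     c  = [False]*n
--     for i in range(1,n):
--         if a[i-1] != a[i]:
--             dif = abs(a[i-1]- a[i])
--             if dif != 1:
--                 return False
--             if a[i-1]< a[i]:
--                 for j in range(1,l+1):
--                     if i-j <0: # 경사로를 놓다가 범위를 벗어나는 경우
--                         return False
--                     if a[i-1] != a[i-j]: # 낮은 지점의 칸의 높이가 모두 같지 않거나, L개 연속되지 않은 경우
--                         return False
--                     if c[i-j]: # 경사로를 놓은 곳에 또 경사로를 놓은 경우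
--                         return False
--                     c[i-j] = True
--             else:
--                 for j in range(l):
--                     if i+j >= n :
--                         return False
--                     if a[i] != a[i+j]:
--                         return False
--                     if c[i+j]:
--                         return False
--                     c[i+j] = True
--     return True
-- ===== SOURCE B (Python) =====
-- def go(a, l):
--     # run-length encode the row, then scan adjacent run pairs carrying a
--     # "previous step was descending" flag instead of marking cells one by one
--     runs = []
--     for h in a:
--         if runs and runs[-1][0] == h:
--             h0, L = runs[-1]
--             runs[-1] = (h0, L + 1)
--         else:
--             runs.append((h, 1))
--     prev_desc = False
--     for (h1, L1), (h2, L2) in zip(runs, runs[1:]):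
--         if abs(h1 - h2) != 1:
--             return False
--         if h1 < h2:
--             if L1 - (l if prev_desc else 0) < l:
--                 return False
--             prev_desc = False
--         else:
--             if L2 < l:
--                 return False
--             prev_desc = True
--     return True
-- ===== Notes on version B (the rewrite author's own statement) =====
-- stated objective: alternative
-- what changed: Replaces the cell-by-cell scan with a mutable marking array c and inner ramp-placing loops by a run-length encoding of the row followed by a single scan over adjacent run pairs carrying only a 'previous step was descending' flag.
import Mathlib
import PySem

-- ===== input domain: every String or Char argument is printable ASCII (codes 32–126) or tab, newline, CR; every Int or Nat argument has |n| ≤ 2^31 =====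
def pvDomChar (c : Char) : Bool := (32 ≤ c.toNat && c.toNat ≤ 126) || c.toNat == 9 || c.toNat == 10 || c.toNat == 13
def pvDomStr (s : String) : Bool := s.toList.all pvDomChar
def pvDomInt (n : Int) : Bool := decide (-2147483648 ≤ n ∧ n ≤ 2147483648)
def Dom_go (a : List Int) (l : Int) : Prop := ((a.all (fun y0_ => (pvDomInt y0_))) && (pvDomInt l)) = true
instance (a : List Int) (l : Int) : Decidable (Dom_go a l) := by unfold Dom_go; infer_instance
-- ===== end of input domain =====

-- B replaces A's cell-by-cell scan with a marking array by a run-length encoding plus one scan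
-- over adjacent run pairs carrying a single "previous step was descending" flag.

-- ===== PORT A =====
-- inner loop `for j in range(1, l+1)` of the ascending branch (early returns -> none);
-- all indices it reads/writes are in range in Python, so pyGetD/pySetD are exact here
def goAsc (a : List Int) (i l j : Int) (c : List Bool) : Option (List Bool) :=
  if _hj : j ≤ l then
    if i - j < 0 then none
    else if PySem.List.pyGetD a (i-1) 0 ≠ PySem.List.pyGetD a (i-j) 0 then none
    else if PySem.List.pyGetD c (i-j) false then none
    else goAsc a i l (j+1) (PySem.List.pySetD c (i-j) true)
  else some c
termination_by (l + 1 - j).toNat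
decreasing_by omega

-- inner loop `for j in range(l)` of the descending branch
def goDesc (a : List Int) (i l j : Int) (c : List Bool) : Option (List Bool) :=
  if _hj : j < l then
    if i + j ≥ (a.length : Int) then none
    else if PySem.List.pyGetD a i 0 ≠ PySem.List.pyGetD a (i+j) 0 then none
    else if PySem.List.pyGetD c (i+j) false then none
    else goDesc a i l (j+1) (PySem.List.pySetD c (i+j) true)
  else some c
termination_by (l - j).toNat
decreasing_by omega

-- outer loop `for i in range(1, n)`
def goMain (a : List Int) (l i : Int) (c : List Bool) : Bool :=
  if _hi : i < (a.length : Int) then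
    if PySem.List.pyGetD a (i-1) 0 ≠ PySem.List.pyGetD a i 0 then
      if (PySem.List.pyGetD a (i-1) 0 - PySem.List.pyGetD a i 0).natAbs ≠ 1 then false
      else if PySem.List.pyGetD a (i-1) 0 < PySem.List.pyGetD a i 0 then
        match goAsc a i l 1 c with
        | none => false
        | some c' => goMain a l (i+1) c'
      else
        match goDesc a i l 0 c with
        | none => false
        | some c' => goMain a l (i+1) c'
    else goMain a l (i+1) c
  else true
termination_by ((a.length : Int) - i).toNat
decreasing_by all_goals omega

def go (a : List Int) (l : Int) : Bool := goMain a l 1 (List.replicate a.length false)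

-- ===== PORT B =====
-- run-length encoding loop: `for h in a: … runs[-1] = (h0, L+1) … runs.append((h,1))`
def buildRuns : List (Int × Int) → List Int → List (Int × Int)
  | rs, [] => rs
  | rs, h :: t =>
    match rs.getLast? with
    | some (h0, L) =>
        if h0 = h then buildRuns (rs.dropLast ++ [(h0, L + 1)]) t
        else buildRuns (rs ++ [(h, 1)]) t
    | none => buildRuns [(h, 1)] t

-- pair scan: `for (h1,L1),(h2,L2) in zip(runs, runs[1:])`
def goScan (l : Int) : List ((Int × Int) × (Int × Int)) → Bool → Bool
  | [], _ => true
  | ((h1, L1), (h2, L2)) :: ps, pd =>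
    if (h1 - h2).natAbs ≠ 1 then false
    else if h1 < h2 then
      if L1 - (if pd then l else 0) < l then false else goScan l ps false
    else
      if L2 < l then false else goScan l ps true

def go_alt (a : List Int) (l : Int) : Bool :=
  let rs := buildRuns [] a
  goScan l (rs.zip (rs.drop 1)) false

-- ===== PRECONDITION & SPEC =====
def Spec_go (a : List Int) (l : Int) (out : Bool) : Prop := out = go_alt a l
instance (a : List Int) (l : Int) (out : Bool) : Decidable (Spec_go a l out) := by unfold Spec_go; infer_instance

-- ===== CLAIM (what is proved, stated in full; the proofs are below) =====
def Claim_equal_go : Prop := ∀ (a : List Int) (l : Int), Dom_go a l → Spec_go a l (go a l)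

-- ===== LEMMAS AND PROOFS =====

-- run-level reference: the runs of a list, consed from the front
def mergeRuns (h L : Int) : List Int → List (Int × Int)
  | [] => [(h, L)]
  | x :: t => if x = h then mergeRuns h (L + 1) t else (h, L) :: mergeRuns x 1 t

-- length of the leading block of x's
def leadLen (x : Int) : List Int → Nat
  | [] => 0
  | y :: t => if y = x then leadLen x t + 1 else 0

-- the runs strictly after the current block of x's
def restRuns (x : Int) : List Int → List (Int × Int)
  | [] => []
  | y :: t => if y = x then restRuns x t else mergeRuns y 1 t

-- the run-level recursion both programs are reduced to
def spec (l : Int) : List (Int × Int) → Bool → Bool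
  | [], _ => true
  | [_], _ => true
  | (h1, L1) :: (h2, L2) :: r, pd =>
    if (h1 - h2).natAbs ≠ 1 then false
    else if h1 < h2 then
      if L1 - (if pd then l else 0) < l then false else spec l ((h2, L2) :: r) false
    else
      if L2 < l then false else spec l ((h2, L2) :: r) true

theorem mergeRuns_eq (t : List Int) : ∀ (x L : Int),
    mergeRuns x L t = (x, L + (leadLen x t : Int)) :: restRuns x t := by
  induction t with
  | nil => intro x L; simp [mergeRuns, leadLen, restRuns]
  | cons y t ih =>
    intro x L
    by_cases hy : y = x
    · simp only [mergeRuns, leadLen, restRuns, if_pos hy, ih x (L + 1)]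
      have : L + 1 + (leadLen x t : Int) = L + ((leadLen x t : Nat) + 1 : Nat) := by push_cast; ring
      rw [this]
    · simp [mergeRuns, leadLen, restRuns, hy, ih]

theorem buildRuns_append (t : List Int) : ∀ (rs : List (Int × Int)) (h L : Int),
    buildRuns (rs ++ [(h, L)]) t = rs ++ mergeRuns h L t := by
  induction t with
  | nil => intro rs h L; simp [buildRuns, mergeRuns]
  | cons x t ih =>
    intro rs h L
    by_cases hx : h = x
    · simp [buildRuns, hx, mergeRuns, ih]
    · have h2 := ih (rs ++ [(h, L)]) x 1
      simp only [buildRuns, List.getLast?_concat, if_neg hx, List.append_assoc] at h2 ⊢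
      rw [h2]
      simp [mergeRuns, Ne.symm hx]

theorem goScan_zip (l : Int) : ∀ (rs : List (Int × Int)) (pd : Bool),
    goScan l (rs.zip (rs.drop 1)) pd = spec l rs pd := by
  intro rs
  match rs with
  | [] => intro pd; simp [goScan, spec]
  | [x] => intro pd; simp [goScan, spec]
  | (h1, L1) :: (h2, L2) :: r =>
    intro pd
    show goScan l (((h1, L1), (h2, L2)) :: ((h2, L2) :: r).zip r) pd = _
    simp only [goScan, spec]
    have := goScan_zip l ((h2, L2) :: r)
    simp only [List.drop_one, List.tail_cons] at this
    rw [this, this]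

-- bridges between pyGetD and getElem!
theorem agD (a : List Int) (p : Nat) (hp : p < a.length) :
    PySem.List.pyGetD a (p : Int) 0 = a[p]! := by
  rw [PySem.List.pyGetD_natCast, List.getD_eq_getElem a 0 hp, getElem!_pos a p hp]

-- characterisation of the leading block: values and the break after it
theorem leadLen_drop (a : List Int) (x : Int) : ∀ (fuel m : Nat), m ≤ a.length → a.length - m ≤ fuel →
    ((∀ k : Nat, k < leadLen x (a.drop m) → m + k < a.length ∧ a[m + k]! = x) ∧
     (m + leadLen x (a.drop m) = a.length ∨
      (m + leadLen x (a.drop m) < a.length ∧ a[m + leadLen x (a.drop m)]! ≠ x))) := by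
  intro fuel
  induction fuel with
  | zero =>
    intro m hm hf
    have hme : m = a.length := by omega
    subst hme
    simp [List.drop_length, leadLen]
  | succ fuel ih =>
    intro m hm hf
    by_cases hlt : m < a.length
    · have hdrop : a.drop m = a[m] :: a.drop (m + 1) := List.drop_eq_getElem_cons hlt
      have hgm : a[m]! = a[m] := getElem!_pos a m hlt
      by_cases hx : a[m] = x
      · have ih' := ih (m + 1) (by omega) (by omega)
        rw [hdrop]
        simp only [leadLen, if_pos hx]
        constructor
        · intro k hk
          match k with
          | 0 => simpa [hgm] using ⟨hlt, hx⟩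
          | k + 1 =>
            obtain ⟨hlt2, hv⟩ := ih'.1 k (by omega)
            refine ⟨by omega, ?_⟩
            rw [show m + (k + 1) = m + 1 + k by omega]; exact hv
        · have := ih'.2
          rcases this with h1 | h2
          · left; omega
          · right
            refine ⟨by omega, ?_⟩
            rw [show m + (leadLen x (a.drop (m+1)) + 1) = m + 1 + leadLen x (a.drop (m+1)) by omega]
            exact h2.2
      · rw [hdrop]
        simp only [leadLen, if_neg hx]
        refine ⟨by intro k hk; omega, Or.inr ⟨by omega, by simpa [hgm] using hx⟩⟩
    · have hme : m = a.length := by omega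
      subst hme
      simp [List.drop_length, leadLen]


-- pyGetD/pySetD при distinct non-negative indices
theorem pyGetD_set_ne (cs : List Bool) (m q : Int) (hm : 0 ≤ m) (hq : 0 ≤ q) (hne : m ≠ q) (v d : Bool) :
    PySem.List.pyGetD (PySem.List.pySetD cs m v) q d = PySem.List.pyGetD cs q d := by
  rw [PySem.List.pySetD_of_nonneg _ _ hm]
  have h1 : q = ((q.toNat : Nat) : Int) := by omega
  rw [h1, PySem.List.pyGetD_natCast, PySem.List.pyGetD_natCast]
  have h2 : m.toNat ≠ q.toNat := by omega
  simp [List.getD_eq_getElem?_getD, List.getElem?_set_ne h2]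

theorem pyGetD_set_eq (cs : List Bool) (m : Int) (hm : 0 ≤ m) (hlt : m.toNat < cs.length) (v d : Bool) :
    PySem.List.pyGetD (PySem.List.pySetD cs m v) m d = v := by
  have h1 : m = ((m.toNat : Nat) : Int) := by omega
  rw [h1, PySem.List.pySetD_natCast, PySem.List.pyGetD_natCast]
  simp [List.getD_eq_getElem?_getD, hlt]

-- ASCENDING LOOP, success case
theorem goAsc_some (a : List Int) (i l : Int) : ∀ (fuel : Nat) (j : Int) (c : List Bool),
    ((l + 1 - j).toNat ≤ fuel) → 1 ≤ j →
    (∀ k : Int, j ≤ k → k ≤ l →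
      0 ≤ i - k ∧ PySem.List.pyGetD a (i - k) 0 = PySem.List.pyGetD a (i - 1) 0 ∧
      PySem.List.pyGetD c (i - k) false = false) →
    ∃ c', goAsc a i l j c = some c' ∧ c'.length = c.length ∧
      (∀ p : Int, i ≤ p → PySem.List.pyGetD c' p false = PySem.List.pyGetD c p false) := by
  intro fuel
  induction fuel with
  | zero =>
    intro j c hf hj H
    rw [goAsc, dif_neg (by omega)]
    exact ⟨c, rfl, rfl, fun p _ => rfl⟩
  | succ fuel ih =>
    intro j c hf hj H
    by_cases hjl : j ≤ l
    · obtain ⟨h0, hh, hc⟩ := H j le_rfl hjl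
      rw [goAsc, dif_pos hjl, if_neg (by omega), if_neg (by simp [hh]), if_neg (by simp [hc])]
      have H' : ∀ k : Int, j + 1 ≤ k → k ≤ l →
          0 ≤ i - k ∧ PySem.List.pyGetD a (i - k) 0 = PySem.List.pyGetD a (i - 1) 0 ∧
          PySem.List.pyGetD (PySem.List.pySetD c (i - j) true) (i - k) false = false := by
        intro k hk1 hk2
        obtain ⟨g0, gh, gc⟩ := H k (by omega) hk2
        refine ⟨g0, gh, ?_⟩
        rw [pyGetD_set_ne c (i - j) (i - k) h0 g0 (by omega)]
        exact gc
      obtain ⟨c', hrec, hlen, hpres⟩ := ih (j + 1) (PySem.List.pySetD c (i - j) true) (by omega) (by omega) H'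
      refine ⟨c', hrec, ?_, ?_⟩
      · exact hlen.trans (PySem.List.length_pySetD _ _ _)
      · intro p hp
        rw [hpres p hp, pyGetD_set_ne c (i - j) p h0 (by omega) (by omega)]
    · rw [goAsc, dif_neg hjl]
      exact ⟨c, rfl, rfl, fun p _ => rfl⟩

-- ASCENDING LOOP, failure case
theorem goAsc_none (a : List Int) (i l : Int) : ∀ (fuel : Nat) (j : Int) (c : List Bool),
    ((l + 1 - j).toNat ≤ fuel) →
    (∃ k : Int, j ≤ k ∧ k ≤ l ∧
      ¬(0 ≤ i - k ∧ PySem.List.pyGetD a (i - k) 0 = PySem.List.pyGetD a (i - 1) 0 ∧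
        PySem.List.pyGetD c (i - k) false = false)) →
    goAsc a i l j c = none := by
  intro fuel
  induction fuel with
  | zero =>
    intro j c hf hbadE
    obtain ⟨k, hk1, hk2, _⟩ := hbadE
    omega
  | succ fuel ih =>
    intro j c hf hbadE
    obtain ⟨k, hk1, hk2, hbad⟩ := hbadE
    have hjl : j ≤ l := by omega
    rw [goAsc, dif_pos hjl]
    by_cases hOK : 0 ≤ i - j ∧ PySem.List.pyGetD a (i - j) 0 = PySem.List.pyGetD a (i - 1) 0 ∧
        PySem.List.pyGetD c (i - j) false = false
    · obtain ⟨h0, hh, hc⟩ := hOK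
      have hkj : k ≠ j := by
        intro he
        exact hbad (he ▸ ⟨h0, hh, hc⟩)
      rw [if_neg (by omega), if_neg (by simp [hh]), if_neg (by simp [hc])]
      apply ih (j + 1) _ (by omega)
      refine ⟨k, by omega, hk2, ?_⟩
      intro hbad2
      obtain ⟨g0, gh, gc⟩ := hbad2
      refine hbad ⟨g0, gh, ?_⟩
      rw [pyGetD_set_ne c (i - j) (i - k) h0 g0 (by omega)] at gc
      exact gc
    · by_cases h0 : 0 ≤ i - j
      · by_cases hh : PySem.List.pyGetD a (i - j) 0 = PySem.List.pyGetD a (i - 1) 0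
        · have hcv : PySem.List.pyGetD c (i - j) false = true := by
            cases hcb : PySem.List.pyGetD c (i - j) false
            · exact absurd ⟨h0, hh, hcb⟩ hOK
            · rfl
          rw [if_neg (by omega), if_neg (by simp [hh]), if_pos (by simp [hcv])]
        · rw [if_neg (by omega), if_pos (fun he => hh he.symm)]
      · rw [if_pos (by omega)]

-- DESCENDING LOOP, success case
theorem goDesc_some (a : List Int) (i l : Int) (hi : 0 ≤ i) : ∀ (fuel : Nat) (j : Int) (c : List Bool),
    ((l - j).toNat ≤ fuel) → 0 ≤ j → c.length = a.length →
    (∀ k : Int, j ≤ k → k < l →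
      i + k < (a.length : Int) ∧ PySem.List.pyGetD a (i + k) 0 = PySem.List.pyGetD a i 0 ∧
      PySem.List.pyGetD c (i + k) false = false) →
    ∃ c', goDesc a i l j c = some c' ∧ c'.length = c.length ∧
      (∀ p : Int, 0 ≤ p → (p < i + j ∨ i + l ≤ p) → PySem.List.pyGetD c' p false = PySem.List.pyGetD c p false) ∧
      (∀ p : Int, i + j ≤ p → p < i + l → PySem.List.pyGetD c' p false = true) := by
  intro fuel
  induction fuel with
  | zero =>
    intro j c hf hj hcl H
    rw [goDesc, dif_neg (by omega)]
    exact ⟨c, rfl, rfl, fun p _ _ => rfl, fun p h1 h2 => by exfalso; omega⟩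
  | succ fuel ih =>
    intro j c hf hj hcl H
    by_cases hjl : j < l
    · obtain ⟨h0, hh, hc⟩ := H j le_rfl hjl
      rw [goDesc, dif_pos hjl, if_neg (by omega), if_neg (by simp [hh]), if_neg (by simp [hc])]
      have H' : ∀ k : Int, j + 1 ≤ k → k < l →
          i + k < (a.length : Int) ∧ PySem.List.pyGetD a (i + k) 0 = PySem.List.pyGetD a i 0 ∧
          PySem.List.pyGetD (PySem.List.pySetD c (i + j) true) (i + k) false = false := by
        intro k hk1 hk2
        obtain ⟨g0, gh, gc⟩ := H k (by omega) hk2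
        refine ⟨g0, gh, ?_⟩
        rw [pyGetD_set_ne c (i + j) (i + k) (by omega) (by omega) (by omega)]
        exact gc
      obtain ⟨c', hrec, hlen, hpres, htrue⟩ := ih (j + 1) (PySem.List.pySetD c (i + j) true) (by omega)
        (by omega) ((PySem.List.length_pySetD _ _ _).trans hcl) H'
      have hlen2 : c'.length = c.length :=
        hlen.trans (PySem.List.length_pySetD _ _ _)
      refine ⟨c', hrec, hlen2, ?_, ?_⟩
      · intro p hp0 hp
        rw [hpres p hp0 (by omega), pyGetD_set_ne c (i + j) p (by omega) hp0 (by omega)]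
      · intro p h1 h2
        by_cases hpe : p = i + j
        · subst hpe
          rw [hpres (i + j) (by omega) (by omega)]
          exact pyGetD_set_eq c (i + j) (by omega) (by omega) true false
        · exact htrue p (by omega) h2
    · rw [goDesc, dif_neg hjl]
      exact ⟨c, rfl, rfl, fun p _ _ => rfl, fun p h1 h2 => by exfalso; omega⟩

-- DESCENDING LOOP, failure case
theorem goDesc_none (a : List Int) (i l : Int) (hi : 0 ≤ i) : ∀ (fuel : Nat) (j : Int) (c : List Bool),
    ((l - j).toNat ≤ fuel) → 0 ≤ j →
    (∃ k : Int, j ≤ k ∧ k < l ∧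
      ¬(i + k < (a.length : Int) ∧ PySem.List.pyGetD a (i + k) 0 = PySem.List.pyGetD a i 0 ∧
        PySem.List.pyGetD c (i + k) false = false)) →
    goDesc a i l j c = none := by
  intro fuel
  induction fuel with
  | zero =>
    intro j c hf hj hbadE
    obtain ⟨k, hk1, hk2, _⟩ := hbadE
    omega
  | succ fuel ih =>
    intro j c hf hj hbadE
    obtain ⟨k, hk1, hk2, hbad⟩ := hbadE
    have hjl : j < l := by omega
    rw [goDesc, dif_pos hjl]
    by_cases hOK : i + j < (a.length : Int) ∧ PySem.List.pyGetD a (i + j) 0 = PySem.List.pyGetD a i 0 ∧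
        PySem.List.pyGetD c (i + j) false = false
    · obtain ⟨h0, hh, hc⟩ := hOK
      have hkj : k ≠ j := by
        intro he
        exact hbad (he ▸ ⟨h0, hh, hc⟩)
      rw [if_neg (by omega), if_neg (by simp [hh]), if_neg (by simp [hc])]
      apply ih (j + 1) _ (by omega) (by omega)
      refine ⟨k, by omega, hk2, ?_⟩
      intro hbad2
      obtain ⟨g0, gh, gc⟩ := hbad2
      refine hbad ⟨g0, gh, ?_⟩
      rw [pyGetD_set_ne c (i + j) (i + k) (by omega) (by omega) (by omega)] at gc
      exact gc
    · by_cases h0 : i + j < (a.length : Int)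
      · by_cases hh : PySem.List.pyGetD a (i + j) 0 = PySem.List.pyGetD a i 0
        · have hcv : PySem.List.pyGetD c (i + j) false = true := by
            cases hcb : PySem.List.pyGetD c (i + j) false
            · exact absurd ⟨h0, hh, hcb⟩ hOK
            · rfl
          rw [if_neg (by omega), if_neg (by simp [hh]), if_pos (by simp [hcv])]
        · rw [if_neg (by omega), if_pos (fun he => hh he.symm)]
      · rw [if_pos (by omega)]

-- MAIN INVARIANT INDUCTION: A's outer loop equals the run-level spec
theorem goMain_spec (a : List Int) (l : Int) : ∀ (fuel i start : Nat) (cl : Bool) (c : List Bool),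
    a.length - i ≤ fuel → 1 ≤ i → i ≤ a.length → start < i →
    (∀ p : Nat, start ≤ p → p < i → a[p]! = a[start]!) →
    (start = 0 ∨ a[start - 1]! ≠ a[start]!) →
    c.length = a.length →
    (∀ p : Nat, start ≤ p → p < a.length →
      PySem.List.pyGetD c (p : Int) false = (cl && decide ((p : Int) < (start : Int) + l))) →
    (cl = true → ∀ p : Int, (start : Int) ≤ p → p < (start : Int) + l →
      p < (a.length : Int) ∧ a[p.toNat]! = a[start]!) →
    goMain a l (i : Int) c = spec l (mergeRuns (a[start]!) ((i : Int) - start) (a.drop i)) cl := by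
  intro fuel
  induction fuel with
  | zero =>
    intro i start cl c hf h1 hin hsi hrun hbreak hclen hc hcl
    have hie : i = a.length := by omega
    rw [goMain, dif_neg (by omega), hie, List.drop_length]
    simp [mergeRuns, spec]
  | succ fuel ih =>
    intro i start cl c hf h1 hin hsi hrun hbreak hclen hc hcl
    by_cases hi : i < a.length
    case neg =>
      have hie : i = a.length := by omega
      rw [goMain, dif_neg (by omega), hie, List.drop_length]
      simp [mergeRuns, spec]
    case pos =>
    have hdropi : a.drop i = a[i] :: a.drop (i + 1) := List.drop_eq_getElem_cons hi
    have hgi : a[i]! = a[i] := getElem!_pos a i hi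
    have hx : PySem.List.pyGetD a ((i : Int) - 1) 0 = a[start]! := by
      have hcast : (i : Int) - 1 = ((i - 1 : Nat) : Int) := by omega
      rw [hcast, agD a (i - 1) (by omega)]
      exact hrun (i - 1) (by omega) (by omega)
    have hy : PySem.List.pyGetD a (i : Int) 0 = a[i]! := agD a i hi
    rw [goMain, dif_pos (by omega : (i : Int) < (a.length : Int)), hx, hy, hdropi, ← hgi]
    by_cases heq : a[start]! = a[i]!
    · rw [if_neg (by simp [heq])]
      have hcast : ((i + 1 : Nat) : Int) - (start : Int) = (i : Int) - start + 1 := by push_cast; ring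
      have ihr := ih (i + 1) start cl c (by omega) (by omega) (by omega) (by omega)
        (fun p hp1 hp2 => by
          by_cases hpi : p < i
          · exact hrun p hp1 hpi
          · have : p = i := by omega
            subst this
            exact heq.symm)
        hbreak hclen hc hcl
      rw [hcast] at ihr
      rw [show ((i : Int) + 1) = ((i + 1 : Nat) : Int) by push_cast; ring, ihr]
      simp only [mergeRuns, if_pos heq.symm]
    · rw [if_pos heq]
      have hne' : ¬ (a[i]! = a[start]!) := fun he => heq he.symm
      simp only [mergeRuns, if_neg hne']
      rw [mergeRuns_eq]
      by_cases hd : (a[start]! - a[i]!).natAbs ≠ 1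
      · rw [if_pos hd]
        simp only [spec, if_pos hd]
      · rw [if_neg hd]
        simp only [spec, if_neg hd]
        -- the height one below the step occupies cells [start, start+l) when cl; they never reach i
        have hclle : cl = true → (start : Int) + l ≤ (i : Int) := by
          intro hcv
          by_contra hplt
          have := (hcl hcv (i : Int) (by omega) (by omega)).2
          rw [Int.toNat_natCast] at this
          exact heq this.symm
        by_cases hlt2 : a[start]! < a[i]!
        · -- ASCENDING step
          rw [if_pos hlt2, if_pos hlt2]
          by_cases hcond : ((i : Int) - start) - (if cl then l else 0) < l
          · -- ramp does not fit: A's inner loop returns, spec returns false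
            have hnone : goAsc a (i : Int) l 1 c = none := by
              apply goAsc_none a (i : Int) l (l + 1 - 1).toNat 1 c le_rfl
              cases hclv : cl with
              | false =>
                rw [hclv] at hcond
                simp at hcond
                refine ⟨(i : Int) - start + 1, by omega, by omega, ?_⟩
                rintro ⟨g0, gh, -⟩
                rcases hbreak with hb0 | hbne
                · omega
                · have hcast : (i : Int) - ((i : Int) - start + 1) = ((start - 1 : Nat) : Int) := by omega
                  rw [hcast, agD a (start - 1) (by omega), hx] at gh
                  exact hbne gh
              | true =>
                rw [hclv] at hcond
                simp at hcond
                have hge := hclle hclv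
                have hl1 : 1 ≤ l := by omega
                refine ⟨(i : Int) - start - l + 1, by omega, by omega, ?_⟩
                rintro ⟨-, -, gc⟩
                have hcast : (i : Int) - ((i : Int) - start - l + 1) = ((start : Int) + l - 1) := by ring
                rw [hcast] at gc
                have hpn : ((start : Int) + l - 1) < (a.length : Int) :=
                  (hcl hclv ((start : Int) + l - 1) (by omega) (by omega)).1
                have hcast2 : (start : Int) + l - 1 = (((start : Int) + l - 1).toNat : Int) := by omega
                rw [hcast2] at gc
                rw [hc ((start : Int) + l - 1).toNat (by omega) (by omega)] at gc
                rw [hclv] at gc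
                simp only [Bool.true_and, decide_eq_false_iff_not] at gc
                omega
            rw [hnone]
            rw [if_pos (by exact hcond)]
          · -- ramp fits: A's inner loop succeeds and the scan continues
            have hlrun : l ≤ (i : Int) - start := by
              cases hclv : cl with
              | false => rw [hclv] at hcond; simp at hcond; omega
              | true => rw [hclv] at hcond; simp at hcond; omega
            have h2l : cl = true → 2 * l ≤ (i : Int) - start := by
              intro hclv
              rw [hclv] at hcond
              simp at hcond
              omega
            have H1 : ∀ k : Int, 1 ≤ k → k ≤ l →
                0 ≤ (i : Int) - k ∧ PySem.List.pyGetD a ((i : Int) - k) 0 = PySem.List.pyGetD a ((i : Int) - 1) 0 ∧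
                PySem.List.pyGetD c ((i : Int) - k) false = false := by
              intro k hk1 hk2
              have h0 : 0 ≤ (i : Int) - k := by omega
              have hkin : ((i : Int) - k).toNat < a.length := by omega
              have hcast : (i : Int) - k = ((((i : Int) - k).toNat : Nat) : Int) := by omega
              refine ⟨h0, ?_, ?_⟩
              · rw [hcast, agD a _ hkin, hx]
                exact hrun _ (by omega) (by omega)
              · rw [hcast, hc _ (by omega) (by omega)]
                cases hclv : cl with
                | false => simp
                | true =>
                  have h2l' := h2l hclv
                  simp only [Bool.true_and, decide_eq_false_iff_not]
                  omega
            obtain ⟨c', hsome, hlen', hpres⟩ :=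
              goAsc_some a (i : Int) l (l + 1 - 1).toNat 1 c le_rfl le_rfl H1
            rw [hsome]
            show goMain a l ((i : Int) + 1) c' = _
            have ihr := ih (i + 1) i false c' (by omega) (by omega) (by omega) (by omega)
              (fun p hp1 hp2 => by
                have : p = i := by omega
                subst this; rfl)
              (Or.inr (by
                rw [show (i - 1 : Nat) = i - 1 from rfl]
                have : a[i - 1]! = a[start]! := hrun (i - 1) (by omega) (by omega)
                rw [this]; exact heq))
              (hlen'.trans hclen)
              (fun p hp1 hp2 => by
                rw [hpres (p : Int) (by omega), hc p (by omega) hp2]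
                cases hclv : cl with
                | false => simp
                | true =>
                  have := hclle hclv
                  have : ¬ (((p : Nat) : Int) < (start : Int) + l) := by omega
                  simp [this])
              (fun hfx => by simp at hfx)
            rw [show ((i : Int) + 1) = ((i + 1 : Nat) : Int) by push_cast; ring,
              ihr, show ((i + 1 : Nat) : Int) - (i : Int) = 1 by push_cast; ring,
              mergeRuns_eq, if_neg hcond]
        · -- DESCENDING step
          rw [if_neg hlt2, if_neg hlt2]
          have hF := leadLen_drop a (a[i]!) (a.length - (i + 1)) (i + 1) (by omega) le_rfl
          have hcells := hF.1
          have hbound := hF.2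
          by_cases hcond : (1 : Int) + (leadLen (a[i]!) (a.drop (i + 1)) : Int) < l
          · -- next run too short: A's inner loop returns, spec returns false
            have hnone : goDesc a (i : Int) l 0 c = none := by
              apply goDesc_none a (i : Int) l (by omega) (l - 0).toNat 0 c le_rfl le_rfl
              refine ⟨1 + (leadLen (a[i]!) (a.drop (i + 1)) : Int), by omega, by omega, ?_⟩
              rintro ⟨g0, gh, -⟩
              rcases hbound with hb1 | hb2
              · omega
              · have hcast : (i : Int) + (1 + (leadLen (a[i]!) (a.drop (i + 1)) : Int)) =
                    ((i + 1 + leadLen (a[i]!) (a.drop (i + 1)) : Nat) : Int) := by push_cast; ring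
                rw [hcast, agD a _ (by omega), hy] at gh
                exact hb2.2 gh
            rw [hnone]
            rw [if_pos (by exact hcond)]
          · -- next run long enough: A marks it and the scan continues with pd = true
            have H2 : ∀ k : Int, 0 ≤ k → k < l →
                (i : Int) + k < (a.length : Int) ∧ PySem.List.pyGetD a ((i : Int) + k) 0 = PySem.List.pyGetD a (i : Int) 0 ∧
                PySem.List.pyGetD c ((i : Int) + k) false = false := by
              intro k hk1 hk2
              have hkd : k = 0 ∨ (1 ≤ k ∧ (k - 1).toNat < leadLen (a[i]!) (a.drop (i + 1))) := by
                by_cases hk0 : k = 0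
                · exact Or.inl hk0
                · exact Or.inr ⟨by omega, by omega⟩
              have hkin : (i : Int) + k < (a.length : Int) := by
                rcases hkd with hk0 | ⟨hk1', hkc⟩
                · omega
                · have := (hcells (k - 1).toNat hkc).1
                  omega
              refine ⟨hkin, ?_, ?_⟩
              · rcases hkd with hk0 | ⟨hk1', hkc⟩
                · rw [hk0]; ring_nf
                · obtain ⟨hlt3, hv3⟩ := hcells (k - 1).toNat hkc
                  have hcast : (i : Int) + k = ((i + 1 + (k - 1).toNat : Nat) : Int) := by omega
                  rw [hcast, agD a _ (by omega), hy]
                  exact hv3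
              · have hcast : (i : Int) + k = ((((i : Int) + k).toNat : Nat) : Int) := by omega
                rw [hcast, hc _ (by omega) (by omega)]
                cases hclv : cl with
                | false => simp
                | true =>
                  have := hclle hclv
                  simp only [Bool.true_and, decide_eq_false_iff_not]
                  omega
            obtain ⟨c', hsome, hlen', hpres, htrue⟩ :=
              goDesc_some a (i : Int) l (by omega) (l - 0).toNat 0 c le_rfl le_rfl hclen H2
            rw [hsome]
            show goMain a l ((i : Int) + 1) c' = _
            have ihr := ih (i + 1) i true c' (by omega) (by omega) (by omega) (by omega)
              (fun p hp1 hp2 => by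
                have : p = i := by omega
                subst this; rfl)
              (Or.inr (by
                have : a[i - 1]! = a[start]! := hrun (i - 1) (by omega) (by omega)
                rw [this]; exact heq))
              (hlen'.trans hclen)
              (fun p hp1 hp2 => by
                by_cases hplt : ((p : Nat) : Int) < (i : Int) + l
                · rw [htrue (p : Int) (by omega) hplt]
                  have : decide (((p : Nat) : Int) < (i : Int) + l) = true := by simp [hplt]
                  simp [this]
                · rw [hpres (p : Int) (by omega) (by omega), hc p (by omega) hp2]
                  have h2 : decide (((p : Nat) : Int) < (i : Int) + l) = false := by simp [hplt]
                  cases hclv : cl with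
                  | false => simp [h2]
                  | true =>
                    have := hclle hclv
                    have h3 : ¬ (((p : Nat) : Int) < (start : Int) + l) := by omega
                    simp [h2, h3])
              (fun _ p hp1 hp2 => by
                obtain ⟨hkin, hv, -⟩ := H2 (p - (i : Int)) (by omega) (by omega)
                rw [show (i : Int) + (p - (i : Int)) = p by ring] at hkin hv
                refine ⟨by omega, ?_⟩
                have hcast : p = ((p.toNat : Nat) : Int) := by omega
                rw [hcast, agD a _ (by omega), hy] at hv
                exact hv)
            rw [show ((i : Int) + 1) = ((i + 1 : Nat) : Int) by push_cast; ring,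
              ihr, show ((i + 1 : Nat) : Int) - (i : Int) = 1 by push_cast; ring,
              mergeRuns_eq, if_neg hcond]

-- ===== VERDICT (by name: the statement is the Claim_ definition above) =====
theorem go_both_eq_spec (a : List Int) (l : Int) : go a l = go_alt a l := by
  match a with
  | [] =>
    rw [go, go_alt]
    rw [goMain, dif_neg (by simp)]
    simp [buildRuns, goScan]
  | h :: t =>
    have hs : go (h :: t) l = spec l (mergeRuns h 1 t) false := by
      rw [go]
      have main := goMain_spec (h :: t) l (h :: t).length 1 0 false
        (List.replicate (h :: t).length false)
        (by omega) le_rfl (by simp) (by omega)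
        (fun p hp1 hp2 => by
          have : p = 0 := by omega
          subst this; rfl)
        (Or.inl rfl)
        (by simp)
        (fun p hp1 hp2 => by
          rw [PySem.List.pyGetD_natCast]
          simp [List.getD_eq_getElem?_getD, List.getElem?_replicate]
          split <;> rfl)
        (fun hfx => by simp at hfx)
      rw [show ((1 : Nat) : Int) = (1 : Int) by norm_num] at main
      rw [main]
      have h0 : (h :: t)[0]! = h := by rfl
      rw [h0]
      simp
    have hb : go_alt (h :: t) l = spec l (mergeRuns h 1 t) false := by
      rw [go_alt]
      show goScan l ((buildRuns [] (h :: t)).zip ((buildRuns [] (h :: t)).drop 1)) false = _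
      have hbr : buildRuns [] (h :: t) = mergeRuns h 1 t := by
        show buildRuns [(h, 1)] t = _
        have := buildRuns_append t [] h 1
        simpa using this
      rw [hbr, goScan_zip]
    rw [hs, hb]

theorem go_spec : Claim_equal_go := by
  intro a l _
  unfold Spec_go
  exact go_both_eq_spec a l
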